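-- pv_equiv track=rewrite | github.com/DylanMsK/TIL | Algorithm/etc/17일차/[모의 SW 역량테스트] 홈 방범 서비스.py | mask_generator
-- ===== SOURCE A (Python) =====
-- def mask_generator(K):
--     l = 2*K-1
--     mask = [[0]*(l) for _ in range(l)]
--     mid = (l)//2
--     for y in range(l):
--         if y <= mid:
--             for x in range(l):
--                 if mid-y <= x < mid+1+y:
--                     mask[y][x] = 1
--         else:
--             for x in range(l):
--                 if mid-(l-1-y) <= x < mid+1+(l-1-y):
--                     mask[y][x] = 1
--
--     relative_location = []
--     for y in range(l):
--         for x in range(l):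
--             if mask[y][x]:
--                 relative_location.append((x-mid, y-mid))
--
--     return (K*K+(K-1)*(K-1), relative_location)
-- ===== SOURCE B (Python) =====
-- def mask_generator(K):
--     relative_location = []
--     for dy in range(-(K - 1), K):
--         d = (K - 1) - abs(dy)
--         for dx in range(-d, d + 1):
--             relative_location.append((dx, dy))
--     return (K*K + (K-1)*(K-1), relative_location)
-- ===== Notes on version B (the rewrite author's own statement) =====
-- stated objective: simpler
-- what changed: B eliminates A's intermediate (2K-1)x(2K-1) mask array and its three passes (build rows, stamp the diamond, rescan to collect), emitting the relative coordinates directly with two nested ranges (dy ascending, dx over the row's Manhattan width).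
import Mathlib
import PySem

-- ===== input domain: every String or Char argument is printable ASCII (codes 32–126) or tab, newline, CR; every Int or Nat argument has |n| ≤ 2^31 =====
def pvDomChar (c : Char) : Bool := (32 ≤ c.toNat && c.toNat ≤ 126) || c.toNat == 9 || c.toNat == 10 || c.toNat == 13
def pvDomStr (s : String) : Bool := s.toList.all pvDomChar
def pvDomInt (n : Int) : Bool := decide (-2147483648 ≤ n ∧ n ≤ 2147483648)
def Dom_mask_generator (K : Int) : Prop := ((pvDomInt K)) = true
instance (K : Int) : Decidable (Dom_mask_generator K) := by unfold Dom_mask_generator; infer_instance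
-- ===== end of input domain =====

-- B drops A's intermediate (2K-1)×(2K-1) mask array entirely and emits the diamond
-- coordinates directly from ranges (objective: simpler).

-- ===== PORT A =====
def mask_generator (K : Int) : Int × (List (Int × Int)) :=
  let l : Int := 2*K - 1
  -- [0]*(l): Python list repetition; empty for l ≤ 0, so `.toNat` (which clamps to 0) is exact here
  let mask0 : List (List Int) := (PySem.List.pyRange 0 l 1).map (fun _ => List.replicate l.toNat 0)
  let mid : Int := PySem.Int.floordiv l 2
  let mask := (PySem.List.pyRange 0 l 1).foldl (fun m y =>
    if y ≤ mid then
      (PySem.List.pyRange 0 l 1).foldl (fun m x =>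
        if mid - y ≤ x ∧ x < mid + 1 + y then
          PySem.List.pySetD m y (PySem.List.pySetD (PySem.List.pyGetD m y []) x 1)
        else m) m
    else
      (PySem.List.pyRange 0 l 1).foldl (fun m x =>
        if mid - (l - 1 - y) ≤ x ∧ x < mid + 1 + (l - 1 - y) then
          PySem.List.pySetD m y (PySem.List.pySetD (PySem.List.pyGetD m y []) x 1)
        else m) m) mask0
  let rel := (PySem.List.pyRange 0 l 1).foldl (fun acc y =>
    (PySem.List.pyRange 0 l 1).foldl (fun acc x =>
      if PySem.List.pyGetD (PySem.List.pyGetD mask y []) x 0 ≠ 0 then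
        acc ++ [(x - mid, y - mid)]
      else acc) acc) []
  (K*K + (K-1)*(K-1), rel)

-- ===== PORT B =====
def mask_generator_alt (K : Int) : Int × (List (Int × Int)) :=
  let rel := (PySem.List.pyRange (-(K - 1)) K 1).foldl (fun acc dy =>
    let d := (K - 1) - |dy|
    (PySem.List.pyRange (-d) (d + 1) 1).foldl (fun acc dx => acc ++ [(dx, dy)]) acc) []
  (K*K + (K-1)*(K-1), rel)

-- ===== PRECONDITION & SPEC =====
def Spec_mask_generator (K : Int) (out : Int × (List (Int × Int))) : Prop := out = mask_generator_alt K
instance (K : Int) (out : Int × (List (Int × Int))) : Decidable (Spec_mask_generator K out) := by unfold Spec_mask_generator; infer_instance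

-- ===== CLAIM (what is proved, stated in full; the proofs are below) =====
def Claim_equal_mask_generator : Prop := ∀ (K : Int), Dom_mask_generator K → Spec_mask_generator K (mask_generator K)

-- ===== LEMMAS AND PROOFS =====

-- one inner x-loop of A, acting on row y only, equals a single set of row y to the folded row
lemma pv_innerRow (cond : Int → Prop) [DecidablePred cond] (xs : List Int) :
    ∀ (m : List (List Int)) (y : Int), 0 ≤ y → y < m.length →
    xs.foldl (fun m x => if cond x then
        PySem.List.pySetD m y (PySem.List.pySetD (PySem.List.pyGetD m y []) x 1) else m) m
    = PySem.List.pySetD m y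
        (xs.foldl (fun r x => if cond x then PySem.List.pySetD r x 1 else r)
          (PySem.List.pyGetD m y [])) := by
  induction xs with
  | nil =>
    intro m y hy hl
    obtain ⟨n, rfl⟩ : ∃ n : ℕ, y = ↑n := ⟨y.toNat, (Int.toNat_of_nonneg hy).symm⟩
    have hn : n < m.length := by exact_mod_cast hl
    simp [PySem.List.pySetD_natCast, PySem.List.pyGetD_natCast, List.getElem?_eq_getElem hn]
  | cons x xs ih =>
    intro m y hy hl
    obtain ⟨n, rfl⟩ : ∃ n : ℕ, y = ↑n := ⟨y.toNat, (Int.toNat_of_nonneg hy).symm⟩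
    have hn : n < m.length := by exact_mod_cast hl
    simp only [List.foldl_cons]
    by_cases hc : cond x
    · simp only [if_pos hc]
      rw [ih _ _ hy (by rw [PySem.List.length_pySetD]; exact hl)]
      simp [PySem.List.pySetD_natCast, PySem.List.pyGetD_natCast,
            hn, List.set_set]
    · simp only [if_neg hc]
      exact ih _ _ hy hl

lemma pv_pySetD_out {α : Type} (r : List α) (x : Int) (v : α)
    (h : ¬ PySem.Raise.InRange r.length x) : PySem.List.pySetD r x v = r := by
  simp [PySem.List.pySetD, (PySem.List.pySet?_eq_none_iff r x v).mpr h]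

-- entries of the folded row: position j becomes 1 exactly if some x ∈ xs with cond x hits it
lemma pv_rowFold_getD (cond : Int → Prop) [DecidablePred cond] :
    ∀ (xs : List Int) (r : List Int) (j : Int), (∀ x ∈ xs, 0 ≤ x) →
    0 ≤ j → j < r.length →
    PySem.List.pyGetD (xs.foldl (fun r x => if cond x then PySem.List.pySetD r x 1 else r) r) j 0
    = if j ∈ xs ∧ cond j then 1 else PySem.List.pyGetD r j 0 := by
  intro xs
  induction xs with
  | nil => intro r j _ hj hjl; simp
  | cons x xs ih =>
    intro r j hxs hj hjl
    have hx0 : 0 ≤ x := hxs x List.mem_cons_self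
    obtain ⟨nj, rfl⟩ : ∃ n : ℕ, j = ↑n := ⟨j.toNat, (Int.toNat_of_nonneg hj).symm⟩
    have hnj : nj < r.length := by exact_mod_cast hjl
    simp only [List.foldl_cons]
    by_cases hc : cond x
    · simp only [if_pos hc]
      rw [ih _ _ (fun z hz => hxs z (List.mem_cons_of_mem _ hz)) hj
            (by rw [PySem.List.length_pySetD]; exact hjl)]
      by_cases hxr : x < (r.length : Int)
      · obtain ⟨nx, rfl⟩ : ∃ n : ℕ, x = ↑n := ⟨x.toNat, (Int.toNat_of_nonneg hx0).symm⟩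
        have hnx : nx < r.length := by exact_mod_cast hxr
        rw [PySem.List.pyGetD_pySetD_natCast _ _ _ _ _ hnx]
        by_cases hmem : (↑nj : Int) ∈ xs ∧ cond ↑nj
        · simp [hmem]
        · simp only [if_neg hmem]
          by_cases hje : nj = nx
          · subst hje
            simp [hc]
          · have : ((↑nj : Int) ∈ (↑nx : Int) :: xs ∧ cond ↑nj) ↔ ((↑nj : Int) ∈ xs ∧ cond ↑nj) := by
              constructor
              · rintro ⟨hm, hcj⟩
                rcases List.mem_cons.mp hm with h | h
                · exact absurd (by exact_mod_cast h) hje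
                · exact ⟨h, hcj⟩
              · rintro ⟨hm, hcj⟩; exact ⟨List.mem_cons_of_mem _ hm, hcj⟩
            rw [if_neg hje, if_neg (by rw [this]; exact hmem)]
      · -- x out of range: the set is a no-op, and j ≠ x
        rw [pv_pySetD_out _ _ _ (by unfold PySem.Raise.InRange; omega)]
        have : ((↑nj : Int) ∈ x :: xs ∧ cond ↑nj) ↔ ((↑nj : Int) ∈ xs ∧ cond ↑nj) := by
          constructor
          · rintro ⟨hm, hcj⟩
            rcases List.mem_cons.mp hm with h | h
            · omega
            · exact ⟨h, hcj⟩
          · rintro ⟨hm, hcj⟩; exact ⟨List.mem_cons_of_mem _ hm, hcj⟩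
        simp only [this]
    · simp only [if_neg hc]
      rw [ih _ _ (fun z hz => hxs z (List.mem_cons_of_mem _ hz)) hj hjl]
      by_cases hje : (↑nj : Int) = x
      · have : ¬ cond ↑nj := by rw [hje]; exact hc
        simp [this]
      · have : ((↑nj : Int) ∈ x :: xs ∧ cond ↑nj) ↔ ((↑nj : Int) ∈ xs ∧ cond ↑nj) := by
          constructor
          · rintro ⟨hm, hcj⟩
            rcases List.mem_cons.mp hm with h | h
            · exact absurd h hje
            · exact ⟨h, hcj⟩
          · rintro ⟨hm, hcj⟩; exact ⟨List.mem_cons_of_mem _ hm, hcj⟩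
        simp only [this]

-- entries of the outer y-fold of A (rows are pairwise distinct, each set once)
lemma pv_outerFold (XS : List Int) (mid : Int) (c1 c2 : Int → Int → Prop)
    [∀ y x, Decidable (c1 y x)] [∀ y x, Decidable (c2 y x)] :
    ∀ (ys : List Int) (m : List (List Int)) (y : Int), ys.Nodup →
    (∀ z ∈ ys, 0 ≤ z ∧ z < m.length) → 0 ≤ y → y < m.length →
    PySem.List.pyGetD (ys.foldl (fun m z =>
      if z ≤ mid then
        XS.foldl (fun m x => if c1 z x then
          PySem.List.pySetD m z (PySem.List.pySetD (PySem.List.pyGetD m z []) x 1) else m) m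
      else
        XS.foldl (fun m x => if c2 z x then
          PySem.List.pySetD m z (PySem.List.pySetD (PySem.List.pyGetD m z []) x 1) else m) m) m) y []
    = if y ∈ ys then
        (if y ≤ mid then
          XS.foldl (fun r x => if c1 y x then PySem.List.pySetD r x 1 else r)
            (PySem.List.pyGetD m y [])
        else
          XS.foldl (fun r x => if c2 y x then PySem.List.pySetD r x 1 else r)
            (PySem.List.pyGetD m y []))
      else PySem.List.pyGetD m y [] := by
  intro ys
  induction ys with
  | nil => intro m y _ _ _ _; simp
  | cons z ys ih =>
    intro m y hnd hin hy hl
    obtain ⟨hznotin, hndtl⟩ := List.nodup_cons.mp hnd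
    obtain ⟨hz0, hzl⟩ := hin z List.mem_cons_self
    simp only [List.foldl_cons]
    by_cases hzm : z ≤ mid
    · rw [if_pos hzm, pv_innerRow (c1 z) XS m z hz0 hzl]
      rw [ih _ y hndtl
            (fun w hw => by
              have := hin w (List.mem_cons_of_mem _ hw)
              rwa [PySem.List.length_pySetD])
            hy (by rwa [PySem.List.length_pySetD])]
      -- now compare entries of the set list
      obtain ⟨n, rfl⟩ : ∃ n : ℕ, y = ↑n := ⟨y.toNat, (Int.toNat_of_nonneg hy).symm⟩
      obtain ⟨nz, rfl⟩ : ∃ n : ℕ, z = ↑n := ⟨z.toNat, (Int.toNat_of_nonneg hz0).symm⟩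
      have hnzl : nz < m.length := by exact_mod_cast hzl
      rw [PySem.List.pyGetD_pySetD_natCast _ _ _ _ _ hnzl]
      by_cases hyz : n = nz
      · subst hyz
        have hymem : (↑n : Int) ∉ ys := hznotin
        simp [hymem, hzm]
      · rw [if_neg hyz]
        by_cases hymem : (↑n : Int) ∈ ys
        · rw [if_pos hymem, if_pos (List.mem_cons_of_mem _ hymem)]
        · rw [if_neg hymem,
              if_neg (by
                intro hmem
                rcases List.mem_cons.mp hmem with h | h
                · exact hyz (by exact_mod_cast h)
                · exact hymem h)]
    · rw [if_neg hzm, pv_innerRow (c2 z) XS m z hz0 hzl]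
      rw [ih _ y hndtl
            (fun w hw => by
              have := hin w (List.mem_cons_of_mem _ hw)
              rwa [PySem.List.length_pySetD])
            hy (by rwa [PySem.List.length_pySetD])]
      obtain ⟨n, rfl⟩ : ∃ n : ℕ, y = ↑n := ⟨y.toNat, (Int.toNat_of_nonneg hy).symm⟩
      obtain ⟨nz, rfl⟩ : ∃ n : ℕ, z = ↑n := ⟨z.toNat, (Int.toNat_of_nonneg hz0).symm⟩
      have hnzl : nz < m.length := by exact_mod_cast hzl
      rw [PySem.List.pyGetD_pySetD_natCast _ _ _ _ _ hnzl]
      by_cases hyz : n = nz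
      · subst hyz
        have hymem : (↑n : Int) ∉ ys := hznotin
        simp [hymem, hzm]
      · rw [if_neg hyz]
        by_cases hymem : (↑n : Int) ∈ ys
        · rw [if_pos hymem, if_pos (List.mem_cons_of_mem _ hymem)]
        · rw [if_neg hymem,
              if_neg (by
                intro hmem
                rcases List.mem_cons.mp hmem with h | h
                · exact hyz (by exact_mod_cast h)
                · exact hymem h)]

-- an interval filter of a range is the corresponding subrange
lemma pv_filter_range (a b c e : Int) (hac : a ≤ c) (hce : c ≤ e) (heb : e ≤ b) :
    (PySem.List.pyRange a b 1).filter (fun x => decide (c ≤ x ∧ x < e))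
    = PySem.List.pyRange c e 1 := by
  rw [PySem.List.pyRange_one_append a c b hac (by omega),
      PySem.List.pyRange_one_append c e b hce heb,
      List.filter_append, List.filter_append]
  have h1 : (PySem.List.pyRange a c 1).filter (fun x => decide (c ≤ x ∧ x < e)) = [] := by
    rw [List.filter_eq_nil_iff]
    intro x hx
    have := PySem.List.mem_pyRange_one.mp hx
    simp only [decide_eq_true_eq]
    omega
  have h2 : (PySem.List.pyRange c e 1).filter (fun x => decide (c ≤ x ∧ x < e))
      = PySem.List.pyRange c e 1 := by
    rw [List.filter_eq_self]
    intro x hx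
    have := PySem.List.mem_pyRange_one.mp hx
    simp only [decide_eq_true_eq]
    omega
  have h3 : (PySem.List.pyRange e b 1).filter (fun x => decide (c ≤ x ∧ x < e)) = [] := by
    rw [List.filter_eq_nil_iff]
    intro x hx
    have := PySem.List.mem_pyRange_one.mp hx
    simp only [decide_eq_true_eq]
    omega
  rw [h1, h2, h3]
  simp

-- shifting a range under a map
lemma pv_map_shift (lo hi c w : Int) :
    (PySem.List.pyRange lo hi 1).map (fun x => ((x - c, w) : Int × Int))
    = (PySem.List.pyRange (lo - c) (hi - c) 1).map (fun dx => (dx, w)) := by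
  rw [PySem.List.pyRange_one lo hi, PySem.List.pyRange_one (lo - c) (hi - c),
      List.map_map, List.map_map]
  have h : (hi - lo).toNat = (hi - c - (lo - c)).toNat := by omega
  rw [← h]
  apply List.map_congr_left
  intro k _
  simp only [Function.comp_apply, Prod.mk.injEq]
  exact ⟨by omega, trivial⟩

-- ===== VERDICT (by name: the statement is the Claim_ definition above) =====
theorem mask_generator_spec : Claim_equal_mask_generator := by
  intro K _
  show mask_generator K = mask_generator_alt K
  simp only [mask_generator, mask_generator_alt]
  by_cases hK : K ≤ 0
  · rw [PySem.List.pyRange_one_eq_nil (show (2*K-1 : Int) ≤ 0 by omega),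
        PySem.List.pyRange_one_eq_nil (show (K : Int) ≤ -(K-1) by omega)]
    simp
  · have hmid : PySem.Int.floordiv (2*K-1) 2 = K - 1 :=
      (PySem.Int.floordiv_eq_iff_of_pos (by omega)).mpr ⟨by omega, by omega⟩
    rw [hmid]
    refine Prod.ext rfl ?_
    dsimp only
    have hlen : (((PySem.List.pyRange 0 (2*K-1) 1).map
        (fun _ : Int => List.replicate (2*K-1).toNat (0:Int))).length : Int) = 2*K-1 := by
      rw [List.length_map, PySem.List.length_pyRange_one]; omega
    -- the built mask, entrywise
    have hmask : ∀ y x : Int, 0 ≤ y → y < 2*K-1 → 0 ≤ x → x < 2*K-1 →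
        PySem.List.pyGetD (PySem.List.pyGetD
          ((PySem.List.pyRange 0 (2*K-1) 1).foldl (fun m y =>
            if y ≤ K-1 then
              (PySem.List.pyRange 0 (2*K-1) 1).foldl (fun m x =>
                if K-1-y ≤ x ∧ x < K-1+1+y then
                  PySem.List.pySetD m y (PySem.List.pySetD (PySem.List.pyGetD m y []) x 1)
                else m) m
            else
              (PySem.List.pyRange 0 (2*K-1) 1).foldl (fun m x =>
                if K-1-(2*K-1-1-y) ≤ x ∧ x < K-1+1+(2*K-1-1-y) then
                  PySem.List.pySetD m y (PySem.List.pySetD (PySem.List.pyGetD m y []) x 1)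
                else m) m)
            ((PySem.List.pyRange 0 (2*K-1) 1).map
              (fun _ : Int => List.replicate (2*K-1).toNat (0:Int)))) y []) x 0
        = if y ≤ K-1 then (if K-1-y ≤ x ∧ x < K-1+1+y then 1 else 0)
          else (if K-1-(2*K-1-1-y) ≤ x ∧ x < K-1+1+(2*K-1-1-y) then 1 else 0) := by
      intro y x hy0 hy hx0 hx
      rw [pv_outerFold (PySem.List.pyRange 0 (2*K-1) 1) (K-1)
            (fun z x => K-1-z ≤ x ∧ x < K-1+1+z)
            (fun z x => K-1-(2*K-1-1-z) ≤ x ∧ x < K-1+1+(2*K-1-1-z))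
            (PySem.List.pyRange 0 (2*K-1) 1) _ y
            (PySem.List.nodup_pyRange_one _ _)
            (fun z hz => by
              have hzz := PySem.List.mem_pyRange_one.mp hz
              exact ⟨hzz.1, by rw [hlen]; exact hzz.2⟩)
            hy0 (by rw [hlen]; exact hy)]
      rw [if_pos (PySem.List.mem_pyRange_one.mpr ⟨hy0, hy⟩)]
      have hxmem : x ∈ PySem.List.pyRange 0 (2*K-1) 1 :=
        PySem.List.mem_pyRange_one.mpr ⟨hx0, hx⟩
      have hrep : PySem.List.pyGetD (List.replicate (2*K-1).toNat (0:Int)) x 0 = 0 := by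
        obtain ⟨n, rfl⟩ : ∃ n : ℕ, x = ↑n := ⟨x.toNat, (Int.toNat_of_nonneg hx0).symm⟩
        rw [PySem.List.pyGetD_natCast]
        simp [List.getD_eq_getElem?_getD, List.getElem?_replicate]
        split <;> rfl
      by_cases hym : y ≤ K-1
      · rw [if_pos hym, if_pos hym,
            PySem.List.pyGetD_map_pyRange_of_nonneg _ _ _ _ hy0 hy,
            pv_rowFold_getD _ _ _ x (fun z hz => (PySem.List.mem_pyRange_one.mp hz).1)
              hx0 (by simp; omega)]
        by_cases hc : K-1-y ≤ x ∧ x < K-1+1+y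
        · rw [if_pos ⟨hxmem, hc⟩, if_pos hc]
        · rw [if_neg (fun h => hc h.2), if_neg hc, hrep]
      · rw [if_neg hym, if_neg hym,
            PySem.List.pyGetD_map_pyRange_of_nonneg _ _ _ _ hy0 hy,
            pv_rowFold_getD _ _ _ x (fun z hz => (PySem.List.mem_pyRange_one.mp hz).1)
              hx0 (by simp; omega)]
        by_cases hc : K-1-(2*K-1-1-y) ≤ x ∧ x < K-1+1+(2*K-1-1-y)
        · rw [if_pos ⟨hxmem, hc⟩, if_pos hc]
        · rw [if_neg (fun h => hc h.2), if_neg hc, hrep]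
    -- rewrite A's collection loop: interval test, then filter/map, then subrange/shift form
    rw [PySem.List.foldl_congr_mem (PySem.List.pyRange 0 (2*K-1) 1) _
          (fun acc y => acc ++ (if y ≤ K-1 then
              (PySem.List.pyRange (K-1-y-(K-1)) (K-1+1+y-(K-1)) 1).map
                (fun dx => (dx, y-(K-1)))
            else
              (PySem.List.pyRange (K-1-(2*K-1-1-y)-(K-1)) (K-1+1+(2*K-1-1-y)-(K-1)) 1).map
                (fun dx => (dx, y-(K-1))))) []
          (fun acc y hyY => by
            beta_reduce
            obtain ⟨hy0, hy⟩ := PySem.List.mem_pyRange_one.mp hyY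
            by_cases hym : y ≤ K-1
            · rw [if_pos hym,
                  PySem.List.foldl_congr_mem _ _
                    (fun acc x => if K-1-y ≤ x ∧ x < K-1+1+y then
                        acc ++ [(x-(K-1), y-(K-1))] else acc) acc
                    (fun acc2 x hxX => by
                      obtain ⟨hx0, hx⟩ := PySem.List.mem_pyRange_one.mp hxX
                      rw [hmask y x hy0 hy hx0 hx, if_pos hym]
                      by_cases hc : K-1-y ≤ x ∧ x < K-1+1+y
                      · simp [hc]
                      · simp),
                  PySem.List.foldl_append_ite (fun x => K-1-y ≤ x ∧ x < K-1+1+y) _ _ acc,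
                  pv_filter_range 0 (2*K-1) (K-1-y) (K-1+1+y) (by omega) (by omega) (by omega),
                  pv_map_shift]
            · rw [if_neg hym,
                  PySem.List.foldl_congr_mem _ _
                    (fun acc x => if K-1-(2*K-1-1-y) ≤ x ∧ x < K-1+1+(2*K-1-1-y) then
                        acc ++ [(x-(K-1), y-(K-1))] else acc) acc
                    (fun acc2 x hxX => by
                      obtain ⟨hx0, hx⟩ := PySem.List.mem_pyRange_one.mp hxX
                      rw [hmask y x hy0 hy hx0 hx, if_neg hym]
                      by_cases hc : K-1-(2*K-1-1-y) ≤ x ∧ x < K-1+1+(2*K-1-1-y)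
                      · simp [hc]
                      · simp),
                  PySem.List.foldl_append_ite
                    (fun x => K-1-(2*K-1-1-y) ≤ x ∧ x < K-1+1+(2*K-1-1-y)) _ _ acc,
                  pv_filter_range 0 (2*K-1) (K-1-(2*K-1-1-y)) (K-1+1+(2*K-1-1-y))
                    (by omega) (by omega) (by omega),
                  pv_map_shift])]
    -- rewrite B's collection loop to append-of-map form
    rw [PySem.List.foldl_congr_mem (PySem.List.pyRange (-(K-1)) K 1) _
          (fun acc dy => acc ++ (PySem.List.pyRange (-(K-1-|dy|)) (K-1-|dy|+1) 1).map
            (fun dx => (dx, dy))) []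
          (fun acc dy _ => by
            beta_reduce
            exact PySem.List.foldl_append_singleton_eq_map _ _ _)]
    rw [PySem.List.foldl_append_eq_flatMap, PySem.List.foldl_append_eq_flatMap,
        List.nil_append, List.nil_append]
    -- both sides as flatMaps over List.range of the same length, compared pointwise
    rw [PySem.List.pyRange_one 0 (2*K-1), PySem.List.pyRange_one (-(K-1)) K,
        List.flatMap_map, List.flatMap_map]
    have hN : (2*K-1-0).toNat = (K - -(K-1)).toNat := by omega
    rw [← hN, List.flatMap_def, List.flatMap_def]
    refine congrArg List.flatten (List.map_congr_left ?_)
    intro k hk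
    beta_reduce
    have hkN : (↑k : Int) < 2*K-1 := by
      have := List.mem_range.mp hk; omega
    have hk0 : (0:Int) ≤ ↑k := Int.natCast_nonneg k
    by_cases hym : (0 : Int) + ↑k ≤ K-1
    · rw [if_pos hym]
      have habs : |(-(K-1) + (↑k:Int))| = K-1-↑k := by
        rcases abs_cases (-(K-1) + (↑k:Int)) with ⟨h1, _⟩ | ⟨h1, _⟩ <;> omega
      have ea : K-1-(0+↑k)-(K-1) = -(K-1-|(-(K-1) + (↑k:Int))|) := by rw [habs]; omega
      have eb : K-1+1+(0+↑k)-(K-1) = K-1-|(-(K-1) + (↑k:Int))|+1 := by rw [habs]; omega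
      have ew : (0:Int)+↑k-(K-1) = -(K-1)+↑k := by omega
      rw [ea, eb, ew]
    · rw [if_neg hym]
      have habs : |(-(K-1) + (↑k:Int))| = ↑k-(K-1) := by
        rcases abs_cases (-(K-1) + (↑k:Int)) with ⟨h1, _⟩ | ⟨h1, _⟩ <;> omega
      have ea : K-1-(2*K-1-1-(0+↑k))-(K-1) = -(K-1-|(-(K-1) + (↑k:Int))|) := by rw [habs]; omega
      have eb : K-1+1+(2*K-1-1-(0+↑k))-(K-1) = K-1-|(-(K-1) + (↑k:Int))|+1 := by rw [habs]; omega
      have ew : (0:Int)+↑k-(K-1) = -(K-1)+↑k := by omega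
      rw [ea, eb, ew]
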